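-- pv_equiv track=rewrite | github.com/mark-P0/memory-process-management | 01-MemoryManagement/03,04-PartitionedDynamic-FirstFit-BestFit/modules/widgets/screens.py | _validate_jobs
-- ===== SOURCE A (Python) =====
-- def _validate_jobs(jobs):
--     ## Condition: At least one (1) job must be entered
--     ## Can(?) be inferred from a column, e.g. "Size"
--     sizes = jobs[1][1:]
--     fail_msg = "At least [b]one (1)[/b] job must be entered."
--     assert (len(sizes) - sizes.count("")) >= 1, fail_msg
--
--     ## "Transpose" data into table-like format
--     table = list(zip(*jobs))
--
--     ## Skip first row, i.e. column headers
--     table_rows = iter(table)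
--     headers = next(table_rows)
--
--     ## Initialize container for valid rows
--     valids = []
--     valids.append(headers)
--
--     ## Iterate through data
--     for row in table_rows:
--         ## Extract row data
--         job_name, *details = row
--         details[1] = details[1][:-3]  # Discard period (` AM` | ` PM`)
--         details[1] = details[1].replace(":", "")  # Remove time separator
--
--         ## Condition: Row must be complete
--         empty_cell_ct = details.count("")
--         if empty_cell_ct == 3:
--             continue  # Skip empty rows
--
--         fail_msg = f"Please complete data for [b]{job_name}[/b]."
--         assert empty_cell_ct == 0, fail_msg
--
--         ## Condition: No job row input must be "skipped"
--         ...
--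
--         ## Add valid to "final" table
--         valids.append(row)
--
--     ## Revert transposition
--     valids = list(zip(*valids))
--     return valids
-- ===== SOURCE B (Python) =====
-- def _validate_jobs(jobs):
--     ## Entry condition: at least one non-empty "Size" cell.
--     sizes = jobs[1][1:]
--     fail_msg = "At least [b]one (1)[/b] job must be entered."
--     assert (len(sizes) - sizes.count("")) >= 1, fail_msg
--
--     ## Work column-wise: no transposition. Rows run up to the shortest column.
--     n = min(len(col) for col in jobs)
--
--     ## Collect the indices of the rows to keep (0 = headers).
--     kept = [0]
--     for i in range(1, n):
--         details = [col[i] for col in jobs[1:]]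
--         details[1] = details[1][:-3].replace(":", "")
--         empties = details.count("")
--         if empties == 3:
--             continue  # wholly empty row
--         fail_msg = f"Please complete data for [b]{jobs[0][i]}[/b]."
--         assert empties == 0, fail_msg
--         kept.append(i)
--
--     ## Emit the columns directly, restricted to the kept rows.
--     return [tuple(col[i] for i in kept) for col in jobs]
-- ===== Notes on version B (the rewrite author's own statement) =====
-- stated objective: alternative
-- what changed: B never transposes: it keeps the data column-wise, collects only the indices of the rows to keep, and emits each output column by restricting the input column to those indices, instead of A's zip-transpose, row filtering and second zip-transpose.
import Mathlib
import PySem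

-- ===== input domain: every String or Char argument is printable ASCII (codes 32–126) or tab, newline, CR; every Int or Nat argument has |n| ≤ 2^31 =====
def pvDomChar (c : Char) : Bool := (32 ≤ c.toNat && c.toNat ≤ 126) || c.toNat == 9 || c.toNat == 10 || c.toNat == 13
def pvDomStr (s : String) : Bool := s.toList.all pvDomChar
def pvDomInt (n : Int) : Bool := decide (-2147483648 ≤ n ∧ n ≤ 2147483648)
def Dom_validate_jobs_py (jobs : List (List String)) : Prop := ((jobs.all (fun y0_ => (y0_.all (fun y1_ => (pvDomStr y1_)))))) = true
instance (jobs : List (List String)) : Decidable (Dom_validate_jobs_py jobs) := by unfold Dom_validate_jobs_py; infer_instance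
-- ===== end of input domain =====

-- B keeps the table column-wise (indices of kept rows) instead of A's double zip-transpose; alternative decomposition, same asymptotics.
-- Asserts of the Python (which raise on failure) are reflected in Pre_, not recomputed inside the ports.

-- ===== PORT A =====
-- zip(*cols): rows up to the shortest column (zip() of no iterables is empty)
def pvZipStar (cols : List (List String)) : List (List String) :=
  let n := ((cols.map List.length).min?).getD 0
  (List.range n).map (fun i => cols.map (fun c => c.getD i ""))

def validate_jobs_py (jobs : List (List String)) : List (List String) :=
  -- sizes = jobs[1][1:] and its assert are entry conditions captured by Pre_
  let table := pvZipStar jobs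
  match table with
  | [] => []  -- next(table_rows) raises StopIteration here: outside Pre_
  | headers :: table_rows =>
    let valids := table_rows.foldl (fun acc row =>
      match row with
      | [] => acc  -- unreachable: rows are nonempty under Pre_
      | _job_name :: details =>
        let details := details.set 1
          (PySem.Str.replace (PySem.Str.slice (details.getD 1 "") none (some (-3))) ":" "")
        let empty_cell_ct := details.count ""
        if empty_cell_ct == 3 then acc
        else acc ++ [row]) [headers]  -- assert empty_cell_ct == 0 is captured by Pre_
    pvZipStar valids

-- ===== PORT B =====
def validate_jobs_py_alt (jobs : List (List String)) : List (List String) :=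
  let n := ((jobs.map List.length).min?).getD 0
  let kept := (List.range' 1 (n - 1)).foldl (fun kept i =>
    let details := (jobs.drop 1).map (fun col => col.getD i "")
    let details := details.set 1
      (PySem.Str.replace (PySem.Str.slice (details.getD 1 "") none (some (-3))) ":" "")
    if details.count "" == 3 then kept
    else kept ++ [i]) [0]
  jobs.map (fun col => kept.map (fun i => col.getD i ""))

-- ===== PRECONDITION & SPEC =====
-- count of empty cells in row i's details after the time-cell normalisation (used by Pre_ only)
def pvRowCt (jobs : List (List String)) (i : Nat) : Nat :=
  let details := (jobs.drop 1).map (fun col => col.getD i "")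
  ((details.set 1
    (PySem.Str.replace (PySem.Str.slice (details.getD 1 "") none (some (-3))) ":" "")).count "")

-- Pre_ excludes exactly the inputs on which the Python A raises: the entry assert on jobs[1][1:]
-- (needing jobs[1] to exist and hold a non-empty size), an empty transposed table (StopIteration on
-- next), rows too short for details[1] (IndexError), and rows whose per-row assert fails.
def Pre_validate_jobs_py (jobs : List (List String)) : Prop :=
  2 ≤ jobs.length ∧
  ((jobs.getD 1 []).drop 1).count "" < ((jobs.getD 1 []).drop 1).length ∧
  1 ≤ ((jobs.map List.length).min?).getD 0 ∧
  (2 ≤ ((jobs.map List.length).min?).getD 0 → 3 ≤ jobs.length) ∧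
  (∀ i ∈ List.range' 1 (((jobs.map List.length).min?).getD 0 - 1),
      pvRowCt jobs i = 0 ∨ pvRowCt jobs i = 3)

instance (jobs : List (List String)) : Decidable (Pre_validate_jobs_py jobs) := by
  unfold Pre_validate_jobs_py; infer_instance

def pvWitness_validate_jobs_py : List (List String) :=
  [["Job", "A"], ["Size", "5"], ["Time", "1:00 AM"], ["End", "2"]]

def Spec_validate_jobs_py (jobs : List (List String)) (out : List (List String)) : Prop := out = validate_jobs_py_alt jobs
instance (jobs : List (List String)) (out : List (List String)) : Decidable (Spec_validate_jobs_py jobs out) := by unfold Spec_validate_jobs_py; infer_instance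

-- ===== CLAIM (what is proved, stated in full; the proofs are below) =====
def Claim_equal_validate_jobs_py : Prop := ∀ (jobs : List (List String)), Dom_validate_jobs_py jobs → Pre_validate_jobs_py jobs → Spec_validate_jobs_py jobs (validate_jobs_py jobs)

-- ===== LEMMAS AND PROOFS =====

theorem pv_foldl_rows (c0 : List String) (rest : List (List String))
    (l : List Nat) (accK : List Nat) :
    (l.map (fun i => (c0 :: rest).map (fun c => c.getD i ""))).foldl
      (fun acc row =>
        match row with
        | [] => acc
        | _job_name :: details =>
          let details := details.set 1
            (PySem.Str.replace (PySem.Str.slice (details.getD 1 "") none (some (-3))) ":" "")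
          let empty_cell_ct := details.count ""
          if empty_cell_ct == 3 then acc else acc ++ [row])
      (accK.map (fun i => (c0 :: rest).map (fun c => c.getD i "")))
    = (l.foldl (fun kept i =>
        let details := rest.map (fun col => col.getD i "")
        let details := details.set 1
          (PySem.Str.replace (PySem.Str.slice (details.getD 1 "") none (some (-3))) ":" "")
        if details.count "" == 3 then kept else kept ++ [i]) accK).map
        (fun i => (c0 :: rest).map (fun c => c.getD i "")) := by
  induction l generalizing accK with
  | nil => simp
  | cons i t ih =>
    simp only [List.map_cons, List.foldl_cons]
    split_ifs with h
    · exact ih accK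
    · simpa using ih (accK ++ [i])

theorem pv_foldl_min_const (L : Nat) (ls : List Nat) (h : ∀ x ∈ ls, x = L) :
    ls.foldl min L = L := by
  induction ls with
  | nil => rfl
  | cons x xs ih =>
    simp only [List.foldl_cons]
    rw [h x (by simp), min_self]
    exact ih (fun y hy => h y (by simp [hy]))

theorem pv_min_const (L : Nat) (l : List (List String))
    (h : ∀ r ∈ l, r.length = L) (hne : l ≠ []) :
    ((l.map List.length).min?).getD 0 = L := by
  match l with
  | [] => exact absurd rfl hne
  | r :: t =>
    have hr : r.length = L := h r (by simp)
    simp only [List.map_cons, List.min?_cons', Option.getD_some]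
    rw [hr]
    exact pv_foldl_min_const L (t.map List.length)
      (by intro x hx; obtain ⟨y, hy, rfl⟩ := List.mem_map.mp hx; exact h y (by simp [hy]))

-- generic: an append-only fold never empties its accumulator
theorem pv_foldl_keep_ne_nil (p : Nat → Bool) (l : List Nat) (acc : List Nat) (h : acc ≠ []) :
    l.foldl (fun kept i => if p i then kept else kept ++ [i]) acc ≠ [] := by
  induction l generalizing acc with
  | nil => exact h
  | cons i t ih =>
    simp only [List.foldl_cons]
    split_ifs with hp
    · exact ih acc h
    · exact ih (acc ++ [i]) (by simp)

-- the row at index i, read column-wise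
def pvRowAt (jobs : List (List String)) (i : Nat) : List String :=
  jobs.map (fun c => c.getD i "")

-- B's kept-index list
def pvKept (jobs : List (List String)) : List Nat :=
  (List.range' 1 ((((jobs.map List.length).min?).getD 0) - 1)).foldl (fun kept i =>
    let details := (jobs.drop 1).map (fun col => col.getD i "")
    let details := details.set 1
      (PySem.Str.replace (PySem.Str.slice (details.getD 1 "") none (some (-3))) ":" "")
    if details.count "" == 3 then kept
    else kept ++ [i]) [0]

theorem pv_kept_ne_nil (jobs : List (List String)) : pvKept jobs ≠ [] := by
  unfold pvKept
  exact pv_foldl_keep_ne_nil _ _ [0] (by simp)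

theorem pv_B_char (jobs : List (List String)) :
    validate_jobs_py_alt jobs = jobs.map (fun col => (pvKept jobs).map (fun i => col.getD i "")) := rfl

theorem pv_A_char (c0 : List String) (rest : List (List String))
    (hn : 1 ≤ ((((c0 :: rest).map List.length).min?).getD 0)) :
    validate_jobs_py (c0 :: rest)
      = pvZipStar ((pvKept (c0 :: rest)).map (pvRowAt (c0 :: rest))) := by
  unfold validate_jobs_py pvZipStar pvKept pvRowAt
  have hrange : List.range ((((c0 :: rest).map List.length).min?).getD 0)
      = 0 :: List.range' 1 (((((c0 :: rest).map List.length).min?).getD 0) - 1) := by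
    rw [List.range_eq_range']
    obtain ⟨m, hm⟩ : ∃ m, (((c0 :: rest).map List.length).min?).getD 0 = m + 1 :=
      ⟨(((c0 :: rest).map List.length).min?).getD 0 - 1, by omega⟩
    rw [hm]
    simp [List.range'_succ]
  dsimp only
  rw [hrange]
  simp only [List.map_cons]
  have := pv_foldl_rows c0 rest
    (List.range' 1 (((((c0 :: rest).map List.length).min?).getD 0) - 1)) [0]
  simp only [List.map_cons, List.map_nil] at this
  simp only [List.drop_succ_cons, List.drop_zero]
  rw [this]
  rfl

theorem pv_final (jobs : List (List String)) :
    pvZipStar ((pvKept jobs).map (pvRowAt jobs))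
      = jobs.map (fun col => (pvKept jobs).map (fun i => col.getD i "")) := by
  unfold pvZipStar
  have hlen : ∀ r ∈ (pvKept jobs).map (pvRowAt jobs), r.length = jobs.length := by
    intro r hr
    obtain ⟨i, _, rfl⟩ := List.mem_map.mp hr
    simp [pvRowAt]
  rw [pv_min_const jobs.length _ hlen (by simp [pv_kept_ne_nil jobs])]
  apply List.ext_getElem
  · simp
  · intro j h1 h2
    simp only [List.getElem_map, List.getElem_range, List.map_map]
    simp only [List.length_map, List.length_range] at h1
    apply List.map_congr_left
    intro i _
    simp only [Function.comp_apply, pvRowAt]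
    simp [List.getD_eq_getElem?_getD, List.getElem?_map, List.getElem?_eq_getElem h1]


theorem validate_jobs_py_spec : Claim_equal_validate_jobs_py := by
  intro jobs _hdom hpre
  obtain ⟨hlen, -, hn1, -, -⟩ := hpre
  unfold Spec_validate_jobs_py
  match jobs, hlen with
  | c0 :: rest, _ =>
    rw [pv_B_char, pv_A_char c0 rest hn1, pv_final]
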